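-- pv_equiv track=rewrite | github.com/Behnoushin/Algorithm | FindFirstPrime.py | findFirstPrime
-- ===== SOURCE A (Python) =====
-- def findFirstPrime(nums: list[int]) -> int:
--
--     def is_prime(num: int) -> bool:
--         if num <= 1:
--             return False
--         if num == 2:
--             return True
--         if num % 2 == 0:
--             return False
--         i = 3
--         while i * i <= num:
--             if num % i == 0:
--                 return False
--             i += 2
--         return True
--
--     for num in nums:
--         if is_prime(num):
--             return num
--     return None
-- ===== SOURCE B (Python) =====
-- def findFirstPrime(nums: list[int]) -> int:
--     if not nums:
--         return None
--     m = max(nums)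
--     if m < 2:
--         return None
--     # integer sqrt of m by a counting loop (no imports, m fits in 2^31 so ~46341 steps max)
--     L = 1
--     while (L + 1) * (L + 1) <= m:
--         L += 1
--     # sieve of Eratosthenes up to L: collect every prime candidate divisor once
--     composite = [False] * (L + 1)
--     primes = []
--     for i in range(2, L + 1):
--         if not composite[i]:
--             primes.append(i)
--             for j in range(i * i, L + 1, i):
--                 composite[j] = True
--     # scan: a value is prime iff >= 2 and no sieved prime p with p*p <= n divides it
--     for n in nums:
--         if n >= 2 and all(not (p * p <= n and n % p == 0) for p in primes):
--             return n
--     return None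
-- ===== Notes on version B (the rewrite author's own statement) =====
-- stated objective: alternative
-- what changed: Replaces per-element sqrt(n) odd-step trial division by a staged precompute-then-scan: guard the empty/all-small list, compute m = max(nums) and its integer square root L, build a Sieve of Eratosthenes table of the primes up to L once, then scan nums and accept the first value >= 2 not divisible by any sieved prime p with p*p <= n.
import Mathlib
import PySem

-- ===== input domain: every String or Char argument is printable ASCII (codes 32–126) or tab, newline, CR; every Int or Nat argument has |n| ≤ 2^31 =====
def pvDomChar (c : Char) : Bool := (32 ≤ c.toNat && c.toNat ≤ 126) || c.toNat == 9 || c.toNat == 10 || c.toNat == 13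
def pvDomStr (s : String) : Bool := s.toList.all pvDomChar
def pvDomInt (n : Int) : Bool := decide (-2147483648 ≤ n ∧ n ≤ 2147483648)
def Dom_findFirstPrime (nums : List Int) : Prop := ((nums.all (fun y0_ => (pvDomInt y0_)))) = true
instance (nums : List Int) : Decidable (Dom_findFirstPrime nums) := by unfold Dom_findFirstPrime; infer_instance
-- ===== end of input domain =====

-- B replaces A's per-element odd-step trial division by a staged precompute-then-scan:
-- max(nums), an integer-sqrt loop for L, a Sieve of Eratosthenes collecting the primes up to L once,
-- then a scan of nums accepting the first value >= 2 with no sieved prime divisor p, p*p <= n (alternative algorithm).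


-- ===== PORT A =====
-- A's inner while loop: i runs over 3,5,7,… while i*i ≤ num.
-- (every '%' in both ports has a positive right operand, where Lean's Int '%' equals Python's '%')
theorem pv_lt_of_sq_le {i num : Int} (h : i * i ≤ num) : i < num + 2 := by
  nlinarith [sq_nonneg (i - 1), mul_self_nonneg i]

def isPrimeA_loop (num i : Int) : Bool :=
  if h : i * i ≤ num then
    if num % i = 0 then false else isPrimeA_loop num (i + 2)
  else true
termination_by (num + 2 - i).toNat
decreasing_by
  have := pv_lt_of_sq_le h
  omega

def isPrimeA (num : Int) : Bool :=
  if num ≤ 1 then false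
  else if num = 2 then true
  else if num % 2 = 0 then false
  else isPrimeA_loop num 3

def findFirstPrime (nums : List Int) : Option Int :=
  match nums with
  | [] => none
  | num :: rest => if isPrimeA num then some num else findFirstPrime rest

-- ===== PORT B =====
-- while (L + 1) * (L + 1) <= m: L += 1
def isqrtLoop (m L : Int) : Int :=
  if h : (L + 1) * (L + 1) ≤ m then isqrtLoop m (L + 1) else L
termination_by (m + 1 - L).toNat
decreasing_by
  have hm0 : (0:Int) ≤ m := le_trans (mul_self_nonneg _) h
  rcases lt_or_ge L 0 with h' | h'
  · omega
  · have h1 : L + 1 ≤ (L + 1) * (L + 1) := by nlinarith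
    have := le_trans h1 h
    omega

-- for j in range(i*i, L+1, i): composite[j] = True   (j is nonnegative and in range, so List.set is Python's assignment)
def markLoop : List Bool → List Int → List Bool
  | c, [] => c
  | c, j :: rest => markLoop (c.set j.toNat true) rest

-- for i in range(2, L+1): if not composite[i]: primes.append(i); mark the multiples of i
def sieveLoop (L : Int) : List Int → List Bool × List Int → List Bool × List Int
  | [], st => st
  | i :: rest, st =>
      sieveLoop L rest
        (if st.1.getD i.toNat false = false
         then (markLoop st.1 (PySem.List.pyRange (i * i) (L + 1) i), st.2 ++ [i])
         else st)

def sieve (L : Int) : List Bool × List Int :=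
  sieveLoop L (PySem.List.pyRange 2 (L + 1) 1) (List.replicate (L + 1).toNat false, [])

-- n >= 2 and all(not (p * p <= n and n % p == 0) for p in primes)
def goodB (primes : List Int) (n : Int) : Bool :=
  decide (2 ≤ n) && primes.all (fun p => !(decide (p * p ≤ n) && decide (n % p = 0)))

def scanB (primes : List Int) : List Int → Option Int
  | [] => none
  | n :: rest => if goodB primes n then some n else scanB primes rest

def findFirstPrime_alt (nums : List Int) : Option Int :=
  match PySem.List.max? nums (fun x => x) with
  | none => none            -- if not nums: return None  (max? = none exactly on the empty list)
  | some m =>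
      if m < 2 then none
      else scanB (sieve (isqrtLoop m 1)).2 nums

-- ===== PRECONDITION & SPEC =====
def Spec_findFirstPrime (nums : List Int) (out : Option Int) : Prop := out = findFirstPrime_alt nums
instance (nums : List Int) (out : Option Int) : Decidable (Spec_findFirstPrime nums out) := by unfold Spec_findFirstPrime; infer_instance

-- ===== CLAIM (what is proved, stated in full; the proofs are below) =====
def Claim_equal_findFirstPrime : Prop := ∀ (nums : List Int), Dom_findFirstPrime nums → Spec_findFirstPrime nums (findFirstPrime nums)

-- ===== LEMMAS AND PROOFS =====

-- "n is prime" as trial division sees it: at least 2, and no divisor d with d*d ≤ n.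
def GoodP (n : Int) : Prop := 2 ≤ n ∧ ∀ d : Int, 2 ≤ d → d * d ≤ n → n % d ≠ 0

theorem pv_dvd_mod (p d n : Int) (h1 : d % p = 0) (h2 : n % d = 0) : n % p = 0 :=
  Int.emod_emod_of_dvd n (Int.dvd_of_emod_eq_zero h1) ▸ (by rw [h2, Int.zero_emod])

theorem pv_small_of_sq {d i n : Int} (hi : 0 ≤ i) (hd : 2 ≤ d) (hdd : d * d ≤ n) (hin : ¬ i * i ≤ n) : d < i := by
  by_contra h
  push Not at h
  exact hin (le_trans (mul_le_mul h h hi (by omega)) hdd)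

theorem loopA_char (n : Int) (hodd : n % 2 = 1) :
    ∀ i : Int, 3 ≤ i → i % 2 = 1 →
    (∀ d : Int, 2 ≤ d → d < i → d * d ≤ n → n % d ≠ 0) →
    (isPrimeA_loop n i = true ↔ ∀ d : Int, 2 ≤ d → d * d ≤ n → n % d ≠ 0) := by
  intro i
  induction i using isPrimeA_loop.induct (num := n) with
  | case1 i h hdvd =>
    intro _ _ _
    rw [isPrimeA_loop, dif_pos h, if_pos hdvd]
    simp only [Bool.false_eq_true, false_iff, not_forall]
    exact ⟨i, by omega, h, by simp [hdvd]⟩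
  | case2 i h hdvd ih =>
    intro hi hi2 hprev
    rw [isPrimeA_loop, dif_pos h, if_neg hdvd]
    refine ih (by omega) (by omega) ?_
    intro d hd hdi hddn
    rcases (by omega : d < i ∨ d = i ∨ d = i + 1) with hc | hc | hc
    · exact hprev d hd hc hddn
    · subst hc; exact hdvd
    · -- d = i + 1 is even; an even divisor would make n even
      intro hmod
      have : n % 2 = 0 := pv_dvd_mod 2 d n (by omega) hmod
      omega
  | case3 i h =>
    intro hi _ hprev
    rw [isPrimeA_loop, dif_neg h]
    simp only [true_iff]
    intro d hd hddn
    exact hprev d hd (pv_small_of_sq (by omega) hd hddn h) hddn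

theorem isPrimeA_char (n : Int) : isPrimeA n = true ↔ GoodP n := by
  unfold isPrimeA GoodP
  split_ifs with h1 h2 h3
  · simp only [false_iff, not_and]; omega
  · subst h2
    simp only [true_iff]
    refine ⟨by norm_num, fun d hd hdd => by nlinarith⟩
  · simp only [false_iff, not_and, not_forall]
    intro _
    exact ⟨2, by norm_num, by omega, by simp [h3]⟩
  · have hodd : n % 2 = 1 := by omega
    rw [loopA_char n hodd 3 (by norm_num) (by norm_num) ?_]
    · constructor
      · exact fun hA => ⟨by omega, hA⟩
      · exact fun hG => hG.2
    · intro d hd hdi hddn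
      have : d = 2 := by omega
      subst this
      intro hmod; exact h3 hmod

theorem int_toNat_dvd {d n : Int} (hd : 0 ≤ d) (hn : 0 ≤ n) (h : d ∣ n) : d.toNat ∣ n.toNat := by
  have h' := Int.natAbs_dvd_natAbs.mpr h
  have e1 : d.natAbs = d.toNat := by omega
  have e2 : n.natAbs = n.toNat := by omega
  rwa [e1, e2] at h'

theorem goodP_of_prime {n : Int} (h2 : 2 ≤ n) (hp : Nat.Prime n.toNat) : GoodP n := by
  refine ⟨h2, ?_⟩
  intro d hd hdd hmod
  have hdvd' : d.toNat ∣ n.toNat :=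
    int_toNat_dvd (by omega) (by omega) (Int.dvd_of_emod_eq_zero hmod)
  rcases hp.eq_one_or_self_of_dvd _ hdvd' with h1 | hs
  · omega
  · have : d = n := by omega
    subst this
    nlinarith

-- a composite-witnessing divisor yields a PRIME divisor q with q*q ≤ n
theorem prime_witness_of_divisor {n d : Int} (h2 : 2 ≤ n) (hd : 2 ≤ d) (hdd : d * d ≤ n) (hmod : n % d = 0) :
    ∃ q : Nat, Nat.Prime q ∧ (q : Int) * q ≤ n ∧ n % (q : Int) = 0 := by
  by_cases ht : Nat.Prime n.toNat
  · exact absurd hmod ((goodP_of_prime h2 ht).2 d hd hdd)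
  · have hq := Nat.minFac_prime (show n.toNat ≠ 1 by omega)
    refine ⟨n.toNat.minFac, hq, ?_, ?_⟩
    · have hsq := Nat.minFac_sq_le_self (show 0 < n.toNat by omega) ht
      rw [pow_two] at hsq
      have : ((n.toNat.minFac * n.toNat.minFac : Nat) : Int) ≤ ((n.toNat : Nat) : Int) := by exact_mod_cast hsq
      push_cast at this
      omega
    · have : ((n.toNat.minFac : Int)) ∣ n := by
        have := Int.natCast_dvd_natCast.mpr (Nat.minFac_dvd n.toNat)
        rwa [Int.toNat_of_nonneg (by omega)] at this
      exact Int.emod_emod_of_dvd n this ▸ (by simp)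

-- a cell of the sieve array is true only for a genuinely composite index
def CompOK (c : List Bool) : Prop :=
  ∀ k : Nat, c.getD k false = true → ∃ a b : Nat, 2 ≤ a ∧ 2 ≤ b ∧ k = a * b

theorem getD_set_true {c : List Bool} {idx k : Nat}
    (h : (c.set idx true).getD k false = true) : k = idx ∨ c.getD k false = true := by
  by_cases he : idx = k
  · left; omega
  · right
    rwa [List.getD_eq_getElem?_getD, List.getElem?_set, if_neg he, ← List.getD_eq_getElem?_getD] at h

theorem compOK_mark (js : List Int)
    (hjs : ∀ j ∈ js, ∃ a b : Nat, 2 ≤ a ∧ 2 ≤ b ∧ j.toNat = a * b) :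
    ∀ c, CompOK c → CompOK (markLoop c js) := by
  induction js with
  | nil => intro c hc; exact hc
  | cons j rest ih =>
    intro c hc
    show CompOK (markLoop (c.set j.toNat true) rest)
    apply ih (fun x hx => hjs x (List.mem_cons_of_mem _ hx))
    intro k hk
    rcases getD_set_true hk with rfl | hk'
    · exact hjs j (List.mem_cons_self ..)
    · exact hc k hk'

theorem range_mult_witness {L i j : Int} (hi : 2 ≤ i)
    (hj : j ∈ PySem.List.pyRange (i * i) (L + 1) i) :
    ∃ a b : Nat, 2 ≤ a ∧ 2 ≤ b ∧ j.toNat = a * b := by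
  obtain ⟨h1, h2, t, ht⟩ := (PySem.List.mem_pyRange_iff_of_pos (by omega) j).mp hj
  have hj' : j = i * (i + t) := by linarith [ht]
  have htge : i ≤ i + t := by nlinarith
  refine ⟨i.toNat, (i + t).toNat, by omega, by omega, ?_⟩
  have : ((i.toNat * (i + t).toNat : Nat) : Int) = j := by
    push_cast
    rw [Int.toNat_of_nonneg (by omega), Int.toNat_of_nonneg (by omega)]
    exact hj'.symm
  omega

-- the sieve keeps CompOK, collects only values ≥ 2, and collects every prime it visits
theorem sieveLoop_inv (L : Int) (is : List Int) :
    ∀ st : List Bool × List Int, (∀ i ∈ is, 2 ≤ i) → CompOK st.1 → (∀ p ∈ st.2, 2 ≤ p) →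
    CompOK (sieveLoop L is st).1 ∧ (∀ p ∈ (sieveLoop L is st).2, 2 ≤ p) ∧
    (∀ p : Int, (p ∈ st.2 ∨ (p ∈ is ∧ 2 ≤ p ∧ Nat.Prime p.toNat)) → p ∈ (sieveLoop L is st).2) := by
  induction is with
  | nil =>
    intro st _ hC hP
    simp only [sieveLoop]
    exact ⟨hC, hP, fun p hp => by rcases hp with h | ⟨h, _⟩ <;> simp_all⟩
  | cons i rest ih =>
    intro st his hC hP
    have hi2 : 2 ≤ i := his i (List.mem_cons_self ..)
    have hrest : ∀ x ∈ rest, 2 ≤ x := fun x hx => his x (List.mem_cons_of_mem _ hx)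
    simp only [sieveLoop]
    by_cases hg : st.1.getD i.toNat false = false
    · rw [if_pos hg]
      have hC' : CompOK (markLoop st.1 (PySem.List.pyRange (i * i) (L + 1) i)) :=
        compOK_mark _ (fun j hj => range_mult_witness hi2 hj) _ hC
      have hP' : ∀ p ∈ st.2 ++ [i], 2 ≤ p := by
        intro p hp
        rcases List.mem_append.mp hp with h | h
        · exact hP p h
        · simp at h; omega
      obtain ⟨c1, c2, c3⟩ := ih (markLoop st.1 (PySem.List.pyRange (i * i) (L + 1) i), st.2 ++ [i]) hrest hC' hP'
      refine ⟨c1, c2, ?_⟩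
      intro p hp
      rcases hp with h | ⟨h, hp2, hpp⟩
      · exact c3 p (Or.inl (List.mem_append.mpr (Or.inl h)))
      · rcases List.mem_cons.mp h with rfl | h'
        · exact c3 p (Or.inl (List.mem_append.mpr (Or.inr (by simp))))
        · exact c3 p (Or.inr ⟨h', hp2, hpp⟩)
    · rw [if_neg hg]
      obtain ⟨c1, c2, c3⟩ := ih st hrest hC hP
      refine ⟨c1, c2, ?_⟩
      intro p hp
      rcases hp with h | ⟨h, hp2, hpp⟩
      · exact c3 p (Or.inl h)
      · rcases List.mem_cons.mp h with rfl | h'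
        · -- the cell of a prime can never be true: CompOK would factor it
          exfalso
          have hg' : st.1.getD p.toNat false = true := by
            cases hgg : st.1.getD p.toNat false
            · exact absurd hgg hg
            · rfl
          obtain ⟨a, b, ha, hb, hab⟩ := hC _ hg'
          rcases hpp.eq_one_or_self_of_dvd a ⟨b, hab⟩ with h1 | hs
          · omega
          · rw [hab] at hs
            nlinarith
        · exact c3 p (Or.inr ⟨h', hp2, hpp⟩)

theorem compOK_replicate (n : Nat) : CompOK (List.replicate n false) := by
  intro k hk
  rcases lt_or_ge k n with h | h
  · rw [List.getD_replicate false h] at hk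
    exact absurd hk (by simp)
  · rw [List.getD_eq_getElem?_getD, List.getElem?_eq_none (by simpa using h)] at hk
    simp at hk

theorem isqrtLoop_spec (m : Int) : ∀ L : Int, 1 ≤ L →
    1 ≤ isqrtLoop m L ∧ m < (isqrtLoop m L + 1) * (isqrtLoop m L + 1) := by
  intro L
  induction L using isqrtLoop.induct (m := m) with
  | case1 L h ih =>
    intro h1
    rw [isqrtLoop, dif_pos h]
    exact ih (by omega)
  | case2 L h =>
    intro h1
    rw [isqrtLoop, dif_neg h]
    exact ⟨h1, not_le.mp h⟩

theorem goodB_eq {P : List Int} {L m : Int} (n : Int)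
    (hS1 : ∀ p ∈ P, 2 ≤ p)
    (hS2 : ∀ p : Int, 2 ≤ p → p ≤ L → Nat.Prime p.toNat → p ∈ P)
    (hm : m < (L + 1) * (L + 1)) (hL : 1 ≤ L) (hn : n ≤ m) :
    goodB P n = isPrimeA n := by
  have hB : goodB P n = true ↔ (2 ≤ n ∧ ∀ p ∈ P, n < p * p ∨ ¬ p ∣ n) := by
    unfold goodB
    simp
  have hiff : goodB P n = true ↔ GoodP n := by
    rw [hB]
    constructor
    · rintro ⟨h2, hall⟩
      refine ⟨h2, ?_⟩
      intro d hd hdd hmod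
      obtain ⟨q, hq, hqq, hqmod⟩ := prime_witness_of_divisor h2 hd hdd hmod
      have hq2 : 2 ≤ (q : Int) := by exact_mod_cast hq.two_le
      have hqL : (q : Int) ≤ L := by nlinarith
      have hqP : (q : Int) ∈ P := hS2 _ hq2 hqL (by simpa using hq)
      rcases hall _ hqP with hlt | hnd
      · omega
      · exact hnd (Int.dvd_of_emod_eq_zero hqmod)
    · rintro ⟨h2, hnd⟩
      refine ⟨h2, ?_⟩
      intro p hp
      by_cases hpl : p * p ≤ n
      · exact Or.inr (fun hdvd => hnd p (hS1 p hp) hpl (Int.emod_emod_of_dvd n hdvd ▸ (by simp)))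
      · exact Or.inl (by omega)
  have hA := isPrimeA_char n
  cases hb : goodB P n <;> cases ha : isPrimeA n <;> simp_all

theorem scan_eq (P : List Int) :
    ∀ nums : List Int, (∀ x ∈ nums, goodB P x = isPrimeA x) →
    scanB P nums = findFirstPrime nums := by
  intro nums h
  induction nums with
  | nil => rfl
  | cons x rest ih =>
    rw [scanB, findFirstPrime, h x (List.mem_cons_self ..)]
    cases isPrimeA x
    · simp only [Bool.false_eq_true, if_false]
      exact ih (fun y hy => h y (List.mem_cons_of_mem _ hy))
    · simp

theorem findFirstPrime_none (nums : List Int) (h : ∀ x ∈ nums, isPrimeA x = false) :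
    findFirstPrime nums = none := by
  induction nums with
  | nil => rfl
  | cons x rest ih =>
    rw [findFirstPrime, h x (List.mem_cons_self ..)]
    simp only [Bool.false_eq_true, if_false]
    exact ih (fun y hy => h y (List.mem_cons_of_mem _ hy))

theorem main_eq (nums : List Int) : findFirstPrime nums = findFirstPrime_alt nums := by
  unfold findFirstPrime_alt
  cases hmax : PySem.List.max? nums (fun x => x) with
  | none =>
    rw [PySem.List.max?_eq_none_iff] at hmax
    subst hmax
    rfl
  | some m =>
    dsimp only
    have hmaxle := PySem.List.max?_isMax hmax
    by_cases hm2 : m < 2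
    · rw [if_pos hm2]
      apply findFirstPrime_none
      intro x hx
      have hxm : x ≤ m := hmaxle x hx
      unfold isPrimeA
      rw [if_pos (by omega)]
    · rw [if_neg hm2]
      obtain ⟨hL1, hLm⟩ := isqrtLoop_spec m 1 le_rfl
      have hrange : ∀ i ∈ PySem.List.pyRange 2 (isqrtLoop m 1 + 1) 1, 2 ≤ i := by
        intro i hi
        exact (PySem.List.mem_pyRange_one.mp hi).1
      obtain ⟨hC, hS1, hS2'⟩ := sieveLoop_inv (isqrtLoop m 1) _
        (List.replicate (isqrtLoop m 1 + 1).toNat false, []) hrange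
        (compOK_replicate _) (by simp)
      have hS2 : ∀ p : Int, 2 ≤ p → p ≤ isqrtLoop m 1 → Nat.Prime p.toNat →
          p ∈ (sieve (isqrtLoop m 1)).2 := by
        intro p hp2 hpL hpp
        exact hS2' p (Or.inr ⟨PySem.List.mem_pyRange_one.mpr ⟨hp2, by omega⟩, hp2, hpp⟩)
      exact (scan_eq _ nums (fun x hx =>
        goodB_eq x hS1 hS2 hLm hL1 (hmaxle x hx))).symm

-- ===== VERDICT (by name: the statement is the Claim_ definition above) =====
theorem findFirstPrime_spec : Claim_equal_findFirstPrime := by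
  intro nums _
  exact main_eq nums
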